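-- pv_equiv track=rewrite | github.com/Tawana2000/Python | Python Advance Challenges/euler-zigzag.py | euler_zigzag
-- ===== SOURCE A (Python) =====
-- def euler_zigzag(n):
--
--     if n < 0:
--         return 0
--     if n <= 1:
--         return 1
--
--     prev2, prev1 = 1, 1
--
--     for i in range(2, n + 1):
--         if i % 2 == 0:
--             prev2, prev1 = prev1, prev1 + prev2
--
--         else:
--             prev2, prev1 = prev1, prev1 * 2
--
--     return prev1
-- ===== SOURCE B (Python) =====
-- def euler_zigzag(n):
--     # closed form: the loop state triples every second step
--     if n < 0:
--         return 0
--     if n <= 1: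
--         return 1
--     if n % 2 == 0:
--         return 2 * 3 ** (n // 2 - 1)
--     return 4 * 3 ** ((n - 3) // 2)
-- ===== Notes on version B (the rewrite author's own statement) =====
-- stated objective: alternative
-- what changed: Replaces A's step-by-step parity-alternating loop by a closed form (the state triples every second step), computed with a single fast exponentiation.
import Mathlib
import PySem

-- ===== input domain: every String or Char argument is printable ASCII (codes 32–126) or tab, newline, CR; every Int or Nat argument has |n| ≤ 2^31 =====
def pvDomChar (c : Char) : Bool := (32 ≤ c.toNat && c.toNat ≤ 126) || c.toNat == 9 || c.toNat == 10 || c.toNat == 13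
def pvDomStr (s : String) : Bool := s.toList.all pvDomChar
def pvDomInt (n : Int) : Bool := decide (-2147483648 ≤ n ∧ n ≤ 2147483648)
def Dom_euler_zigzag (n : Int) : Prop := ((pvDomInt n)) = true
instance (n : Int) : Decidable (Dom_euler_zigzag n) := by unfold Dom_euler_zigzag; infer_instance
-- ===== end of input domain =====

-- B replaces A's step-by-step loop by a closed-form power computation (alternative decomposition).

-- ===== PORT A =====
-- loop body of A's for-loop (parity-alternating state update)
def zigStep (s : Int × Int) (i : Int) : Int × Int :=
  if PySem.Int.mod i 2 = 0 then (s.2, s.2 + s.1) else (s.2, s.2 * 2)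

def euler_zigzag (n : Int) : Int :=
  if n < 0 then 0
  else if n ≤ 1 then 1
  else ((PySem.List.pyRange 2 (n + 1) 1).foldl zigStep (1, 1)).2

-- ===== PORT B =====
def euler_zigzag_alt (n : Int) : Int :=
  if n < 0 then 0
  else if n ≤ 1 then 1
  else if PySem.Int.mod n 2 = 0 then 2 * 3 ^ (PySem.Int.floordiv n 2 - 1).toNat
  else 4 * 3 ^ (PySem.Int.floordiv (n - 3) 2).toNat

-- ===== PRECONDITION & SPEC =====
def Spec_euler_zigzag (n : Int) (out : Int) : Prop := out = euler_zigzag_alt n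
instance (n : Int) (out : Int) : Decidable (Spec_euler_zigzag n out) := by unfold Spec_euler_zigzag; infer_instance

-- ===== CLAIM (what is proved, stated in full; the proofs are below) =====
def Claim_equal_euler_zigzag : Prop := ∀ (n : Int), Dom_euler_zigzag n → Spec_euler_zigzag n (euler_zigzag n)

-- ===== LEMMAS AND PROOFS =====

-- closed form of A's state component prev1 after reaching index k
def cf (k : Nat) : Int :=
  if k ≤ 1 then 1
  else if k % 2 = 0 then 2 * 3 ^ (k / 2 - 1)
  else 4 * 3 ^ ((k - 3) / 2)

lemma cf_even (t : Nat) : cf (2 * t + 2) = 2 * 3 ^ t := by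
  unfold cf
  rw [if_neg (by omega), if_pos (by omega)]
  have h : (2 * t + 2) / 2 - 1 = t := by omega
  rw [h]

lemma cf_odd (t : Nat) : cf (2 * t + 3) = 4 * 3 ^ t := by
  unfold cf
  rw [if_neg (by omega), if_neg (by omega)]
  have h : (2 * t + 3 - 3) / 2 = t := by omega
  rw [h]

lemma mod_two_cast (k : Nat) : PySem.Int.mod (k : Int) 2 = ((k % 2 : Nat) : Int) := by
  rw [PySem.Int.mod_eq_emod_of_pos (by omega)]
  omega

lemma zig_loop (m : Nat) :
    (PySem.List.pyRange 2 ((m : Int) + 3) 1).foldl zigStep (1, 1) = (cf (m + 1), cf (m + 2)) := by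
  induction m with
  | zero => decide
  | succ m ih =>
    have hsplit : PySem.List.pyRange 2 ((↑(m + 1) : Int) + 3) 1
        = PySem.List.pyRange 2 ((m : Int) + 3) 1 ++ [(m : Int) + 3] := by
      have : ((↑(m + 1) : Int) + 3) = ((m : Int) + 3) + 1 := by push_cast; ring
      rw [this, PySem.List.pyRange_one_succ_right (by omega)]
    rw [hsplit, List.foldl_append, ih]
    have hmod : PySem.Int.mod ((m : Int) + 3) 2 = ((((m + 3) % 2 : Nat)) : Int) := by
      have := mod_two_cast (m + 3); push_cast at this ⊢; omega
    rcases Nat.even_or_odd m with ⟨t, ht⟩ | ⟨t, ht⟩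
    · -- m = t + t even, so m + 3 is odd: doubling step
      subst ht
      simp only [List.foldl_cons, List.foldl_nil, zigStep, hmod]
      rw [if_neg (by omega)]
      have h1 : t + t + 1 + 1 = 2 * t + 2 := by omega
      have h2 : t + t + 1 + 2 = 2 * t + 3 := by omega
      rw [h1, h2, cf_even, cf_odd]
      exact Prod.ext rfl (by ring)
    · -- m = 2t + 1 odd, so m + 3 is even: addition step
      subst ht
      simp only [List.foldl_cons, List.foldl_nil, zigStep, hmod]
      rw [if_pos (by omega)]
      have h1 : 2 * t + 1 + 1 = 2 * t + 2 := by omega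
      have h2 : 2 * t + 1 + 2 = 2 * t + 3 := by omega
      have h3 : 2 * t + 1 + 1 + 2 = 2 * (t + 1) + 2 := by omega
      rw [h1, h2, h3, cf_even, cf_odd, cf_even]
      exact Prod.ext rfl (by ring)

lemma alt_eq_cf (k : Nat) (hk : 2 ≤ k) : euler_zigzag_alt (k : Int) = cf k := by
  unfold euler_zigzag_alt
  rw [if_neg (by omega), if_neg (by omega)]
  rcases Nat.even_or_odd k with ⟨t, ht⟩ | ⟨t, ht⟩
  · -- k even, k = 2t with t ≥ 1
    have hk2 : k = 2 * (t - 1) + 2 := by omega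
    rw [mod_two_cast, if_pos (by omega)]
    have hdiv : PySem.Int.floordiv (k : Int) 2 - 1 = ((t - 1 : Nat) : Int) := by
      rw [PySem.Int.floordiv_eq_ediv_of_pos (by omega)]; omega
    rw [hdiv, Int.toNat_natCast, hk2, cf_even]
  · -- k odd, k = 2t+1 with t ≥ 1
    have hk2 : k = 2 * (t - 1) + 3 := by omega
    rw [mod_two_cast, if_neg (by omega)]
    have hdiv : PySem.Int.floordiv ((k : Int) - 3) 2 = ((t - 1 : Nat) : Int) := by
      rw [PySem.Int.floordiv_eq_ediv_of_pos (by omega)]; omega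
    rw [hdiv, Int.toNat_natCast, hk2, cf_odd]

-- ===== VERDICT (by name: the statement is the Claim_ definition above) =====
theorem euler_zigzag_spec : Claim_equal_euler_zigzag := by
  intro n _
  unfold Spec_euler_zigzag
  by_cases h0 : n < 0
  · simp [euler_zigzag, euler_zigzag_alt, h0]
  · by_cases h1 : n ≤ 1
    · simp [euler_zigzag, euler_zigzag_alt, h0, h1]
    · -- n ≥ 2: write n = m + 2 with m : Nat
      obtain ⟨m, hm⟩ : ∃ m : Nat, n = (m : Int) + 2 := ⟨(n - 2).toNat, by omega⟩
      have hA : euler_zigzag n = cf (m + 2) := by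
        unfold euler_zigzag
        rw [if_neg h0, if_neg h1]
        have : n + 1 = (m : Int) + 3 := by omega
        rw [this, zig_loop]
      have hB : euler_zigzag_alt n = cf (m + 2) := by
        have : n = ((m + 2 : Nat) : Int) := by push_cast; omega
        rw [this, alt_eq_cf _ (by omega)]
      rw [hA, hB]
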